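-- pv_equiv track=rewrite | github.com/pon07029/Baekjoon | 12911.py | f
-- ===== SOURCE A (Python) =====
-- def f(n,k):
--     if n==1:
--         arr=[1 for _ in range(k+1)]
--         arr[0]=0
--         return arr
--     dp = f(n-1,k)
--     su=sum(dp)
--     li=[su]*(k+1)
--     li[0]=0
--     for i in range(1,k+1):
--         for j in range(2*i,k+1,i):
--             li[j]-=dp[i]
--     for i in range(1,k+1):
--         li[i]%=(10**9+7)
--     return li
-- ===== SOURCE B (Python) =====
-- M = 10 ** 9 + 7
--
-- def f(n, k):
--     # bottom-up: start at the n==1 layer and iterate; each entry computed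
--     # directly as (total - sum over proper divisors) % M
--     dp = [0] + [1] * k
--     for _ in range(n - 1):
--         su = sum(dp)
--         dp = [0] + [(su - sum(dp[d] for d in range(1, j) if j % d == 0)) % M
--                     for j in range(1, k + 1)]
--     return dp
-- ===== Notes on version B (the rewrite author's own statement) =====
-- stated objective: alternative
-- what changed: Recursion on n is replaced by a bottom-up loop, and A's nested in-place sieve (for each i, subtract dp[i] from every multiple j of i) is replaced by building each layer entry directly as (total - sum of dp over proper divisors of j) % M with a per-index comprehension; no list mutation at all.
import Mathlib
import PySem

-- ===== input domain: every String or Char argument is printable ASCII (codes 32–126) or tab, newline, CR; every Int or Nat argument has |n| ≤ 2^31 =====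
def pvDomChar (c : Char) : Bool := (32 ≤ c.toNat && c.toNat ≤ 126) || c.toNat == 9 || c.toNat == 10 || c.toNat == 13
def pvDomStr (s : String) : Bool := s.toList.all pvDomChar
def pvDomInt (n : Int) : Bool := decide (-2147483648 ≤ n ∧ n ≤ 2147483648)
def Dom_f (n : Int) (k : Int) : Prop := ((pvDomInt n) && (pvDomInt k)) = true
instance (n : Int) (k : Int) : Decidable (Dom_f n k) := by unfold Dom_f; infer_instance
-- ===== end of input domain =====

-- B replaces A's recursion on n and in-place multiples sieve by a bottom-up loop whose
-- layers are built entrywise as (total - sum over proper divisors) % (10^9+7); same values.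

-- ===== PORT A =====
-- Python tests `n == 1`; for n < 1 the Python recursion never returns (outside Pre_f),
-- so the port bases at n ≤ 1 to terminate.
def f (n : Int) (k : Int) : List Int :=
  if n ≤ 1 then
    ((PySem.List.pyRange 0 (k+1) 1).map (fun _ => (1:Int))).set 0 0
  else
    let dp := f (n-1) k
    let su := dp.sum
    let li := (List.replicate (k+1).toNat su).set 0 0
    let li2 := (PySem.List.pyRange 1 (k+1) 1).foldl (fun li i =>
        (PySem.List.pyRange (2*i) (k+1) i).foldl (fun li j =>
          li.set j.toNat (PySem.List.pyGetD li j 0 - PySem.List.pyGetD dp i 0)) li) li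
    (PySem.List.pyRange 1 (k+1) 1).foldl (fun li i =>
        li.set i.toNat (PySem.Int.mod (PySem.List.pyGetD li i 0) (10^9+7))) li2
termination_by n.toNat
decreasing_by omega

-- ===== PORT B =====
def fAltLayer (k : Int) (dp : List Int) : List Int :=
  let su := dp.sum
  0 :: (PySem.List.pyRange 1 (k+1) 1).map (fun j =>
    PySem.Int.mod
      (su - (((PySem.List.pyRange 1 j 1).filter (fun d => PySem.Int.mod j d == 0)).map
        (fun d => PySem.List.pyGetD dp d 0)).sum)
      (10^9+7))

def f_alt (n : Int) (k : Int) : List Int :=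
  (PySem.List.pyRange 0 (n-1) 1).foldl (fun dp _ => fAltLayer k dp)
    ((0:Int) :: List.replicate k.toNat 1)

-- ===== PRECONDITION & SPEC =====
-- Python A raises RecursionError for n < 1 (no base case) and IndexError for k < 0
-- (`arr[0]=0` on an empty list); exactly those inputs are excluded.
def Pre_f (n : Int) (k : Int) : Prop := 1 ≤ n ∧ 0 ≤ k
instance (n : Int) (k : Int) : Decidable (Pre_f n k) := by unfold Pre_f; infer_instance
def pvWitness_f : Int × Int := (3, 5)

def Spec_f (n : Int) (k : Int) (out : List Int) : Prop := out = f_alt n k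
instance (n : Int) (k : Int) (out : List Int) : Decidable (Spec_f n k out) := by unfold Spec_f; infer_instance

-- ===== CLAIM (what is proved, stated in full; the proofs are below) =====
def Claim_equal_f : Prop := ∀ (n : Int) (k : Int), Dom_f n k → Pre_f n k → Spec_f n k (f n k)

-- ===== LEMMAS AND PROOFS =====

-- A's recursive step, as a function of the recursive result (used only in the proofs)
def Astep (k : Int) (dp : List Int) : List Int :=
  let su := dp.sum
  let li := (List.replicate (k+1).toNat su).set 0 0
  let li2 := (PySem.List.pyRange 1 (k+1) 1).foldl (fun li i =>
      (PySem.List.pyRange (2*i) (k+1) i).foldl (fun li j =>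
        li.set j.toNat (PySem.List.pyGetD li j 0 - PySem.List.pyGetD dp i 0)) li) li
  (PySem.List.pyRange 1 (k+1) 1).foldl (fun li i =>
      li.set i.toNat (PySem.Int.mod (PySem.List.pyGetD li i 0) (10^9+7))) li2

lemma f_one (k : Int) : f 1 k = ((PySem.List.pyRange 0 (k+1) 1).map (fun _ => (1:Int))).set 0 0 := by
  rw [f.eq_def]; simp

lemma f_succ (n k : Int) (h : 1 < n) : f n k = Astep k (f (n-1) k) := by
  rw [f.eq_def, if_neg (by omega)]; rfl

lemma setfold_length (g : Int → Int) (js : List Int) : ∀ (li : List Int),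
    (js.foldl (fun li j => li.set j.toNat (g (PySem.List.pyGetD li j 0))) li).length = li.length := by
  induction js with
  | nil => intro li; rfl
  | cons j rest ih => intro li; simp [List.foldl_cons, ih]

lemma setfold_getD (g : Int → Int) (js : List Int) : ∀ (li : List Int),
    (∀ j ∈ js, 0 ≤ j ∧ j < (li.length : Int)) → js.Nodup → ∀ (t : Nat),
    (js.foldl (fun li j => li.set j.toNat (g (PySem.List.pyGetD li j 0))) li).getD t 0
      = if (t:Int) ∈ js then g (li.getD t 0) else li.getD t 0 := by
  induction js with
  | nil => intro li _ _ t; simp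
  | cons j rest ih =>
    intro li hb hnd t
    have hj0 : 0 ≤ j := (hb j (List.mem_cons_self)).1
    have hjl : j < (li.length : Int) := (hb j (List.mem_cons_self)).2
    have hlen' : (li.set j.toNat (g (PySem.List.pyGetD li j 0))).length = li.length := by simp
    have hb' : ∀ x ∈ rest, 0 ≤ x ∧ x < ((li.set j.toNat (g (PySem.List.pyGetD li j 0))).length : Int) := by
      intro x hx; rw [hlen']; exact hb x (List.mem_cons_of_mem _ hx)
    rw [List.foldl_cons, ih _ hb' hnd.of_cons t]
    rw [PySem.List.pyGetD_of_nonneg li 0 hj0]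
    by_cases hcase : (t:Int) = j
    · have ht : t = j.toNat := by omega
      have htm : (t:Int) ∉ rest := by
        intro hmem; exact (List.nodup_cons.mp hnd).1 (hcase ▸ hmem)
      rw [if_neg htm, if_pos (by simp [hcase])]
      subst ht
      have hlt : j.toNat < li.length := by omega
      simp [List.getD_eq_getElem?_getD, hlt]
    · have hne : j.toNat ≠ t := by omega
      have hset : (li.set j.toNat (g (li.getD j.toNat 0))).getD t 0 = li.getD t 0 := by
        simp [List.getD_eq_getElem?_getD, hne]
      rw [hset]
      by_cases hmem : (t:Int) ∈ rest
      · rw [if_pos hmem, if_pos (List.mem_cons_of_mem _ hmem)]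
      · rw [if_neg hmem, if_neg (by simp [hcase, hmem])]

lemma nodup_pyRange_pos (a b : Int) {s : Int} (hs : 0 < s) : (PySem.List.pyRange a b s).Nodup := by
  rw [PySem.List.pyRange_of_pos a b hs]
  refine List.Nodup.map ?_ (List.nodup_range)
  intro x y h
  have hx : s * (x:Int) = s * (y:Int) := by linarith
  exact_mod_cast mul_left_cancel₀ (ne_of_gt hs) hx

lemma outerfold_length (k : Int) (dp : List Int) (is : List Int) : ∀ (li : List Int),
    (is.foldl (fun li i =>
      (PySem.List.pyRange (2*i) (k+1) i).foldl (fun li j =>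
        li.set j.toNat (PySem.List.pyGetD li j 0 - PySem.List.pyGetD dp i 0)) li) li).length = li.length := by
  induction is with
  | nil => intro li; rfl
  | cons i rest ih =>
    intro li
    rw [List.foldl_cons, ih]
    exact setfold_length (fun x => x - PySem.List.pyGetD dp i 0) _ li

lemma outerfold_getD (k : Int) (dp : List Int) (is : List Int) : ∀ (li : List Int),
    (∀ i ∈ is, 1 ≤ i) → li.length = (k+1).toNat → ∀ (t : Nat),
    (is.foldl (fun li i =>
      (PySem.List.pyRange (2*i) (k+1) i).foldl (fun li j =>
        li.set j.toNat (PySem.List.pyGetD li j 0 - PySem.List.pyGetD dp i 0)) li) li).getD t 0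
      = li.getD t 0 - ((is.filter (fun i => decide ((t:Int) ∈ PySem.List.pyRange (2*i) (k+1) i))).map
          (fun i => PySem.List.pyGetD dp i 0)).sum := by
  induction is with
  | nil => intro li _ _ t; simp
  | cons i rest ih =>
    intro li h1 hlen t
    have hi1 : 1 ≤ i := h1 i List.mem_cons_self
    have hbounds : ∀ j ∈ PySem.List.pyRange (2*i) (k+1) i, 0 ≤ j ∧ j < (li.length : Int) := by
      intro j hj
      rw [PySem.List.mem_pyRange_iff_of_pos (by omega)] at hj
      rw [hlen]
      omega
    have hinner : ((PySem.List.pyRange (2*i) (k+1) i).foldl (fun li j =>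
          li.set j.toNat (PySem.List.pyGetD li j 0 - PySem.List.pyGetD dp i 0)) li).getD t 0
        = if (t:Int) ∈ PySem.List.pyRange (2*i) (k+1) i
            then li.getD t 0 - PySem.List.pyGetD dp i 0 else li.getD t 0 := by
      simpa using setfold_getD (fun x => x - PySem.List.pyGetD dp i 0)
        (PySem.List.pyRange (2*i) (k+1) i) li hbounds (nodup_pyRange_pos _ _ (by omega)) t
    have hilen : ((PySem.List.pyRange (2*i) (k+1) i).foldl (fun li j =>
          li.set j.toNat (PySem.List.pyGetD li j 0 - PySem.List.pyGetD dp i 0)) li).length = li.length :=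
      setfold_length (fun x => x - PySem.List.pyGetD dp i 0) _ li
    rw [List.foldl_cons,
      ih _ (fun x hx => h1 x (List.mem_cons_of_mem _ hx)) (hilen.trans hlen) t, hinner]
    by_cases hm : (t:Int) ∈ PySem.List.pyRange (2*i) (k+1) i
    · simp only [List.filter_cons, hm, decide_true, if_pos, List.map_cons, List.sum_cons]
      omega
    · simp only [List.filter_cons, hm, decide_false, Bool.false_eq_true, if_false]

lemma mem_mult_iff (k t i : Int) (htk : t ≤ k) (hi : 1 ≤ i) :
    (t ∈ PySem.List.pyRange (2*i) (k+1) i) ↔ (i ∣ t ∧ 2*i ≤ t) := by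
  rw [PySem.List.mem_pyRange_iff_of_pos (by omega)]
  constructor
  · rintro ⟨h1, _, h3⟩
    exact ⟨by simpa using dvd_add h3 (dvd_mul_left i 2), h1⟩
  · rintro ⟨hd, h2i⟩
    exact ⟨h2i, by omega, dvd_sub hd (dvd_mul_left i 2)⟩

lemma sumA_eq_sumB (k : Int) (dp : List Int) (t : Int) (ht1 : 1 ≤ t) (htk : t ≤ k) :
    (((PySem.List.pyRange 1 (k+1) 1).filter
        (fun i => decide (t ∈ PySem.List.pyRange (2*i) (k+1) i))).map
        (fun i => PySem.List.pyGetD dp i 0)).sum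
      = (((PySem.List.pyRange 1 t 1).filter (fun d => PySem.Int.mod t d == 0)).map
        (fun d => PySem.List.pyGetD dp d 0)).sum := by
  rw [PySem.List.pyRange_one_append 1 t (k+1) ht1 (by omega), List.filter_append]
  have h2 : (PySem.List.pyRange t (k+1) 1).filter
      (fun i => decide (t ∈ PySem.List.pyRange (2*i) (k+1) i)) = [] := by
    rw [List.filter_eq_nil_iff]
    intro i hi
    rw [PySem.List.mem_pyRange_one] at hi
    simp only [decide_eq_true_eq]
    intro hmem
    rw [PySem.List.mem_pyRange_iff_of_pos (by omega)] at hmem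
    omega
  rw [h2, List.append_nil]
  have hpq : ∀ i ∈ PySem.List.pyRange 1 t 1,
      (decide (t ∈ PySem.List.pyRange (2*i) (k+1) i)) = (PySem.Int.mod t i == 0) := by
    intro i hi
    rw [PySem.List.mem_pyRange_one] at hi
    have hiff : (t ∈ PySem.List.pyRange (2*i) (k+1) i) ↔ (i ∣ t) := by
      rw [mem_mult_iff k t i htk (by omega)]
      constructor
      · exact fun h => h.1
      · intro hd
        refine ⟨hd, ?_⟩
        obtain ⟨c, hc⟩ := hd
        have hc1 : 1 < c := by
          by_contra hcon
          have hcle : c ≤ 1 := by omega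
          have : t ≤ i := by nlinarith
          omega
        nlinarith
    by_cases hdvd : i ∣ t
    · simp [hiff, hdvd, (PySem.Int.mod_eq_zero_iff_dvd t i).mpr hdvd]
    · have hne : PySem.Int.mod t i ≠ 0 := fun h => hdvd ((PySem.Int.mod_eq_zero_iff_dvd t i).mp h)
      simp [hiff, hdvd, hne]
  rw [List.filter_congr hpq]

lemma Astep_getD (k : Int) (dp : List Int) (hk : 0 ≤ k) (t : Nat) (ht : t < (k+1).toNat) :
    (Astep k dp).getD t 0 =
      if t = 0 then 0
      else PySem.Int.mod (dp.sum -
        (((PySem.List.pyRange 1 (k+1) 1).filter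
            (fun i => decide ((t:Int) ∈ PySem.List.pyRange (2*i) (k+1) i))).map
          (fun i => PySem.List.pyGetD dp i 0)).sum) (10^9+7) := by
  simp only [Astep]
  have hlen0 : ((List.replicate (k+1).toNat dp.sum).set 0 0).length = (k+1).toNat := by simp
  have hlen2 : ((PySem.List.pyRange 1 (k+1) 1).foldl (fun li i =>
      (PySem.List.pyRange (2*i) (k+1) i).foldl (fun li j =>
        li.set j.toNat (PySem.List.pyGetD li j 0 - PySem.List.pyGetD dp i 0)) li)
      ((List.replicate (k+1).toNat dp.sum).set 0 0)).length = (k+1).toNat :=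
    (outerfold_length k dp _ _).trans hlen0
  have hmod := setfold_getD (fun x => PySem.Int.mod x (10^9+7)) (PySem.List.pyRange 1 (k+1) 1)
    ((PySem.List.pyRange 1 (k+1) 1).foldl (fun li i =>
      (PySem.List.pyRange (2*i) (k+1) i).foldl (fun li j =>
        li.set j.toNat (PySem.List.pyGetD li j 0 - PySem.List.pyGetD dp i 0)) li)
      ((List.replicate (k+1).toNat dp.sum).set 0 0))
    (by intro i hi; rw [PySem.List.mem_pyRange_one] at hi; rw [hlen2]; omega)
    (PySem.List.nodup_pyRange_one 1 (k+1)) t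
  refine hmod.trans ?_
  rw [outerfold_getD k dp (PySem.List.pyRange 1 (k+1) 1) _
    (by intro i hi; rw [PySem.List.mem_pyRange_one] at hi; omega) hlen0 t]
  have hli0 : ((List.replicate (k+1).toNat dp.sum).set 0 0).getD t 0
      = if t = 0 then 0 else dp.sum := by
    rcases Nat.eq_zero_or_pos t with h0 | hpos
    · subst h0
      simp [List.getD_eq_getElem?_getD, show 0 < (k+1).toNat by omega]
    · have h0t : (0:Nat) ≠ t := by omega
      simp [List.getD_eq_getElem?_getD, h0t, ht]
      intro h
      omega
  rw [hli0]
  rcases Nat.eq_zero_or_pos t with h0 | hpos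
  · subst h0
    have hnm : ((0:Nat):Int) ∉ PySem.List.pyRange 1 (k+1) 1 := by
      rw [PySem.List.mem_pyRange_one]; omega
    have hs0 : (PySem.List.pyRange 1 (k+1) 1).filter
        (fun i => decide (((0:Nat):Int) ∈ PySem.List.pyRange (2*i) (k+1) i)) = [] := by
      rw [List.filter_eq_nil_iff]
      intro i hi
      rw [PySem.List.mem_pyRange_one] at hi
      simp only [decide_eq_true_eq]
      intro hmem
      rw [PySem.List.mem_pyRange_iff_of_pos (by omega)] at hmem
      omega
    rw [if_neg hnm, hs0]
    simp
  · have hne : t ≠ 0 := by omega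
    have hm : (t:Int) ∈ PySem.List.pyRange 1 (k+1) 1 := by
      rw [PySem.List.mem_pyRange_one]; omega
    rw [if_pos hm, if_neg hne, if_neg hne]

lemma Astep_eq (k : Int) (hk : 0 ≤ k) (dp : List Int) : Astep k dp = fAltLayer k dp := by
  have hlenA : (Astep k dp).length = (k+1).toNat := by
    simp only [Astep]
    exact ((setfold_length (fun x => PySem.Int.mod x (10^9+7)) _ _).trans
      (outerfold_length k dp _ _)).trans (by simp)
  have hlenB : (fAltLayer k dp).length = k.toNat + 1 := by
    simp [fAltLayer, PySem.List.length_pyRange_one]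
  apply List.ext_getElem (by rw [hlenA, hlenB]; omega)
  intro t h1 h2
  have ht : t < (k+1).toNat := by omega
  have hgdA : (Astep k dp)[t] = (Astep k dp).getD t 0 := by
    simp [List.getD_eq_getElem?_getD, List.getElem?_eq_getElem h1]
  rw [hgdA, Astep_getD k dp hk t ht]
  rcases t with _ | s
  · simp [fAltLayer]
  · have hsk : (1:Int) + (s:Int) ≤ k := by
      rw [hlenB] at h2; omega
    have hcast : ((s+1:Nat):Int) = 1 + (s:Int) := by push_cast; ring
    simp only [fAltLayer, List.getElem_cons_succ, List.getElem_map,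
      PySem.List.getElem_pyRange_one]
    rw [if_neg (Nat.succ_ne_zero s), hcast,
      sumA_eq_sumB k dp (1 + (s:Int)) (by omega) hsk]

lemma f_alt_one (k : Int) : f_alt 1 k = (0:Int) :: List.replicate k.toNat 1 := by
  simp [f_alt, PySem.List.pyRange_one_eq_nil (by omega : (0:Int) ≤ 0)]

lemma f_alt_succ (m : Nat) (k : Int) :
    f_alt ((m:Int)+1+1) k = fAltLayer k (f_alt ((m:Int)+1) k) := by
  simp only [f_alt]
  have h1 : (m:Int)+1+1-1 = (m:Int)+1 := by ring
  have h2 : (m:Int)+1-1 = (m:Int) := by ring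
  rw [h1, h2, PySem.List.pyRange_one_succ_right (by exact_mod_cast Nat.zero_le m),
    List.foldl_append]
  rfl

lemma main_eq (m : Nat) : ∀ (k : Int), 0 ≤ k → f ((m:Int)+1) k = f_alt ((m:Int)+1) k := by
  induction m with
  | zero =>
    intro k hk
    rw [show ((0:Nat):Int)+1 = 1 by simp, f_one, f_alt_one]
    have hmap : (PySem.List.pyRange 0 (k+1) 1).map (fun _ => (1:Int))
        = List.replicate (k.toNat + 1) 1 := by
      have hlen : (PySem.List.pyRange 0 (k+1) 1).length = k.toNat + 1 := by
        rw [PySem.List.length_pyRange_one]; omega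
      rw [List.eq_replicate_iff]
      refine ⟨by simpa using hlen, ?_⟩
      intro b hb
      obtain ⟨x, _, hx⟩ := List.mem_map.mp hb
      exact hx.symm
    rw [hmap, List.replicate_succ, List.set_cons_zero]
  | succ m ih =>
    intro k hk
    have hc : ((m+1:Nat):Int) + 1 = ((m:Int)+1)+1 := by push_cast; ring
    have hm0 : (0:Int) ≤ (m:Int) := by exact_mod_cast Nat.zero_le m
    rw [hc, f_succ _ _ (by omega), show ((m:Int)+1+1) - 1 = (m:Int)+1 by ring,
      ih k hk, Astep_eq k hk (f_alt ((m:Int)+1) k), f_alt_succ m k]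

-- ===== VERDICT (by name: the statement is the Claim_ definition above) =====
theorem f_spec : Claim_equal_f := by
  intro n k _ hpre
  unfold Spec_f
  obtain ⟨hn, hk⟩ := hpre
  have hm : n = ((n-1).toNat : Int) + 1 := by omega
  rw [hm]
  exact main_eq (n-1).toNat k hk
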